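-- pv_equiv track=rewrite | github.com/Ascendral/KlomboAGI | klomboagi/reasoning/pattern_planner.py | _identify_action
-- ===== SOURCE A (Python) =====
-- def _identify_action(desc: str) -> str:
--     if any(w in desc for w in ["fix", "repair", "debug", "correct"]): return "fix"
--     if any(w in desc for w in ["write", "create", "generate", "build"]): return "create"
--     if any(w in desc for w in ["find", "search", "extract", "identify"]): return "extract"
--     if any(w in desc for w in ["count", "compute", "calculate"]): return "compute"
--     if any(w in desc for w in ["sort", "rank", "order"]): return "sort"
--     if any(w in desc for w in ["filter", "remove", "keep"]): return "filter"
--     if any(w in desc for w in ["parse", "read", "analyze"]): return "parse"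
--     if any(w in desc for w in ["summarize", "describe"]): return "summarize"
--     if any(w in desc for w in ["convert", "transform"]): return "transform"
--     return "unknown"
-- ===== SOURCE B (Python) =====
-- # Inverted index: keyword -> (priority, category); return the matching keyword's
-- # category of minimal priority (no early return), "unknown" if none matches.
-- _KEYWORDS = {
--     "fix": (0, "fix"), "repair": (0, "fix"), "debug": (0, "fix"), "correct": (0, "fix"),
--     "write": (1, "create"), "create": (1, "create"), "generate": (1, "create"), "build": (1, "create"),
--     "find": (2, "extract"), "search": (2, "extract"), "extract": (2, "extract"), "identify": (2, "extract"),
--     "count": (3, "compute"), "compute": (3, "compute"), "calculate": (3, "compute"),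
--     "sort": (4, "sort"), "rank": (4, "sort"), "order": (4, "sort"),
--     "filter": (5, "filter"), "remove": (5, "filter"), "keep": (5, "filter"),
--     "parse": (6, "parse"), "read": (6, "parse"), "analyze": (6, "parse"),
--     "summarize": (7, "summarize"), "describe": (7, "summarize"),
--     "convert": (8, "transform"), "transform": (8, "transform"),
-- }
--
-- def _identify_action(desc: str) -> str:
--     best = None
--     for kw, (prio, cat) in _KEYWORDS.items():
--         if kw in desc and (best is None or prio < best[0]):
--             best = (prio, cat)
--     return "unknown" if best is None else best[1]
-- ===== Notes on version B (the rewrite author's own statement) =====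
-- stated objective: alternative
-- what changed: Replaces the ordered first-match if-chain over rule groups by an inverted keyword->(priority,category) index scanned in full with a minimum-priority accumulator (order-independent min instead of priority-ordered early return).
import Mathlib
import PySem

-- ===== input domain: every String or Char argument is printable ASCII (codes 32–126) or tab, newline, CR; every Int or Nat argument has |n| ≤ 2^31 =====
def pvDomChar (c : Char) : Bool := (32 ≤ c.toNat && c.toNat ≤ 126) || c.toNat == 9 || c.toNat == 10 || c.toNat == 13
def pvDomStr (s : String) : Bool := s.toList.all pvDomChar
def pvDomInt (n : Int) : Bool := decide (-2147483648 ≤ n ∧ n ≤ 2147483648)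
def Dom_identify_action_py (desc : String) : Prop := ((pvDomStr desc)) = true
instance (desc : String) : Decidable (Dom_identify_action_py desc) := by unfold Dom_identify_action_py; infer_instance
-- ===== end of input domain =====

-- B replaces A's priority-ordered first-match if-chain by an inverted keyword->(priority,category) index scanned in full with a minimum-priority accumulator (alternative decomposition, same cost).

-- ===== PORT A =====
def identify_action_py (desc : String) : String :=
  if (["fix", "repair", "debug", "correct"].any (fun w => PySem.Str.isIn w desc)) then "fix"
  else if (["write", "create", "generate", "build"].any (fun w => PySem.Str.isIn w desc)) then "create"
  else if (["find", "search", "extract", "identify"].any (fun w => PySem.Str.isIn w desc)) then "extract"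
  else if (["count", "compute", "calculate"].any (fun w => PySem.Str.isIn w desc)) then "compute"
  else if (["sort", "rank", "order"].any (fun w => PySem.Str.isIn w desc)) then "sort"
  else if (["filter", "remove", "keep"].any (fun w => PySem.Str.isIn w desc)) then "filter"
  else if (["parse", "read", "analyze"].any (fun w => PySem.Str.isIn w desc)) then "parse"
  else if (["summarize", "describe"].any (fun w => PySem.Str.isIn w desc)) then "summarize"
  else if (["convert", "transform"].any (fun w => PySem.Str.isIn w desc)) then "transform"
  else "unknown"

-- ===== PORT B =====
-- inverted index keyword -> (priority, category), in Source B's insertion order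
def pvKeywordIndex : List (String × (Int × String)) :=
  [ ("fix", (0, "fix")),
    ("repair", (0, "fix")),
    ("debug", (0, "fix")),
    ("correct", (0, "fix")),
    ("write", (1, "create")),
    ("create", (1, "create")),
    ("generate", (1, "create")),
    ("build", (1, "create")),
    ("find", (2, "extract")),
    ("search", (2, "extract")),
    ("extract", (2, "extract")),
    ("identify", (2, "extract")),
    ("count", (3, "compute")),
    ("compute", (3, "compute")),
    ("calculate", (3, "compute")),
    ("sort", (4, "sort")),
    ("rank", (4, "sort")),
    ("order", (4, "sort")),
    ("filter", (5, "filter")),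
    ("remove", (5, "filter")),
    ("keep", (5, "filter")),
    ("parse", (6, "parse")),
    ("read", (6, "parse")),
    ("analyze", (6, "parse")),
    ("summarize", (7, "summarize")),
    ("describe", (7, "summarize")),
    ("convert", (8, "transform")),
    ("transform", (8, "transform")) ]

-- one loop iteration of Source B: update the current best (min-priority) match
def pvBestStep (desc : String) (best : Option (Int × String)) (e : String × (Int × String)) :
    Option (Int × String) :=
  if PySem.Str.isIn e.1 desc then
    match best with
    | none => some e.2
    | some (p, c) => if e.2.1 < p then some e.2 else some (p, c)
  else best

def identify_action_py_alt (desc : String) : String :=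
  match pvKeywordIndex.foldl (pvBestStep desc) none with
  | none => "unknown"
  | some (_, cat) => cat

-- ===== PRECONDITION & SPEC =====
def Spec_identify_action_py (desc : String) (out : String) : Prop := out = identify_action_py_alt desc
instance (desc : String) (out : String) : Decidable (Spec_identify_action_py desc out) := by unfold Spec_identify_action_py; infer_instance

-- ===== CLAIM (what is proved, stated in full; the proofs are below) =====
def Claim_equal_identify_action_py : Prop := ∀ (desc : String), Dom_identify_action_py desc → Spec_identify_action_py desc (identify_action_py desc)

-- ===== LEMMAS AND PROOFS =====
theorem pv_ports_agree (desc : String) : identify_action_py desc = identify_action_py_alt desc := by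
  unfold identify_action_py identify_action_py_alt pvKeywordIndex
  by_cases h0 : PySem.Str.isIn "fix" desc = true
  · simp_all [pvBestStep]
  by_cases h1 : PySem.Str.isIn "repair" desc = true
  · simp_all [pvBestStep]
  by_cases h2 : PySem.Str.isIn "debug" desc = true
  · simp_all [pvBestStep]
  by_cases h3 : PySem.Str.isIn "correct" desc = true
  · simp_all [pvBestStep]
  by_cases h4 : PySem.Str.isIn "write" desc = true
  · simp_all [pvBestStep]
  by_cases h5 : PySem.Str.isIn "create" desc = true
  · simp_all [pvBestStep]
  by_cases h6 : PySem.Str.isIn "generate" desc = true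
  · simp_all [pvBestStep]
  by_cases h7 : PySem.Str.isIn "build" desc = true
  · simp_all [pvBestStep]
  by_cases h8 : PySem.Str.isIn "find" desc = true
  · simp_all [pvBestStep]
  by_cases h9 : PySem.Str.isIn "search" desc = true
  · simp_all [pvBestStep]
  by_cases h10 : PySem.Str.isIn "extract" desc = true
  · simp_all [pvBestStep]
  by_cases h11 : PySem.Str.isIn "identify" desc = true
  · simp_all [pvBestStep]
  by_cases h12 : PySem.Str.isIn "count" desc = true
  · simp_all [pvBestStep]
  by_cases h13 : PySem.Str.isIn "compute" desc = true
  · simp_all [pvBestStep]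
  by_cases h14 : PySem.Str.isIn "calculate" desc = true
  · simp_all [pvBestStep]
  by_cases h15 : PySem.Str.isIn "sort" desc = true
  · simp_all [pvBestStep]
  by_cases h16 : PySem.Str.isIn "rank" desc = true
  · simp_all [pvBestStep]
  by_cases h17 : PySem.Str.isIn "order" desc = true
  · simp_all [pvBestStep]
  by_cases h18 : PySem.Str.isIn "filter" desc = true
  · simp_all [pvBestStep]
  by_cases h19 : PySem.Str.isIn "remove" desc = true
  · simp_all [pvBestStep]
  by_cases h20 : PySem.Str.isIn "keep" desc = true
  · simp_all [pvBestStep]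
  by_cases h21 : PySem.Str.isIn "parse" desc = true
  · simp_all [pvBestStep]
  by_cases h22 : PySem.Str.isIn "read" desc = true
  · simp_all [pvBestStep]
  by_cases h23 : PySem.Str.isIn "analyze" desc = true
  · simp_all [pvBestStep]
  by_cases h24 : PySem.Str.isIn "summarize" desc = true
  · simp_all [pvBestStep]
  by_cases h25 : PySem.Str.isIn "describe" desc = true
  · simp_all [pvBestStep]
  by_cases h26 : PySem.Str.isIn "convert" desc = true
  · simp_all [pvBestStep]
  by_cases h27 : PySem.Str.isIn "transform" desc = true
  · simp_all [pvBestStep]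
  simp_all [pvBestStep]

-- ===== VERDICT (by name: the statement is the Claim_ definition above) =====
theorem identify_action_py_spec : Claim_equal_identify_action_py := by
  intro desc _
  unfold Spec_identify_action_py
  exact pv_ports_agree desc
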